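-- pv_equiv track=rewrite | github.com/nthauvin/scripts | sqrt_sum4.py | gen_nexts
-- ===== SOURCE A (Python) =====
-- def gen_nexts(N, numbers, squares):
--     """
--     Computes a dictionnary of available moves for each number
--     """
--     nexts = dict()
--     for i in numbers :
--         for j in range(i+1, N+1):
--             if i+j in squares:
--                 nexts[i] = nexts.get(i, []) + [j]
--                 nexts[j] = nexts.get(j, []) + [i]
--     return nexts
-- ===== SOURCE B (Python) =====
-- def gen_nexts(N, numbers, squares):
--     """
--     Computes a dictionnary of available moves for each number
--     """
--     sq = sorted(set(squares))
--     events = [kv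
--               for i in numbers
--               for s in sq if 2 * i < s <= i + N
--               for kv in ((i, s - i), (s - i, i))]
--     nexts = {}
--     for k, v in events:
--         nexts.setdefault(k, []).append(v)
--     return nexts
-- ===== Notes on version B (the rewrite author's own statement) =====
-- stated objective: faster
-- what changed: B replaces A's per-i scan of every j in range(i+1,N+1) with a list-membership test by two staged passes: it sorts the deduplicated squares once, builds a flat list of (key,partner) events by deriving j = s - i from each square s in the window (2i, i+N], and then folds that event list once into the dict with setdefault/append.
import Mathlib
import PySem

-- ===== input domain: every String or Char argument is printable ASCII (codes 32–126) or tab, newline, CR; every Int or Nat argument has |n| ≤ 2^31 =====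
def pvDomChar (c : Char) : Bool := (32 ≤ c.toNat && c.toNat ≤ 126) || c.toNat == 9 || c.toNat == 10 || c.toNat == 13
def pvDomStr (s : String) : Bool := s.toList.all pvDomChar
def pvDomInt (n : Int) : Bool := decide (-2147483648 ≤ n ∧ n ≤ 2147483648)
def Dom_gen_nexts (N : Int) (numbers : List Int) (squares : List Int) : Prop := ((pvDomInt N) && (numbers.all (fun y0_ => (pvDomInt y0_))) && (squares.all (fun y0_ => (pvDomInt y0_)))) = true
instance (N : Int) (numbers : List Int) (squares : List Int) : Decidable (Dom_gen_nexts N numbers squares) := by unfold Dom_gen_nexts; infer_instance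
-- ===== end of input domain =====

-- B replaces A's per-i scan of all j in (i, N] with a membership test by two staged passes:
-- sort the deduplicated squares once, build a flat event list of (key, partner) pairs from
-- j = s - i for squares s in (2i, i+N], then fold the events once into the dict: faster.

-- ===== PORT A =====
def gen_nexts (N : Int) (numbers : List Int) (squares : List Int) : List (Int × List Int) :=
  (numbers.foldl (fun nexts i =>
    (PySem.List.pyRange (i + 1) (N + 1) 1).foldl (fun nexts j =>
      if i + j ∈ squares then
        let nexts := nexts.insert i (nexts.getD i [] ++ [j])
        nexts.insert j (nexts.getD j [] ++ [i])
      else nexts) nexts)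
    (PySem.Dict.empty : PySem.Dict Int (List Int))).items

-- ===== PORT B =====
def gen_nexts_alt (N : Int) (numbers : List Int) (squares : List Int) : List (Int × List Int) :=
  let sq := PySem.List.sorted (PySem.Set.ofList squares) (fun x => x) false
  let events := numbers.flatMap (fun i =>
    (sq.filter (fun s => decide (2 * i < s ∧ s ≤ i + N))).flatMap
      (fun s => [(i, s - i), (s - i, i)]))
  (events.foldl
    (fun nexts kv => nexts.insert kv.1 (nexts.getD kv.1 [] ++ [kv.2]))
    (PySem.Dict.empty : PySem.Dict Int (List Int))).items

-- ===== PRECONDITION & SPEC =====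
def Spec_gen_nexts (N : Int) (numbers : List Int) (squares : List Int) (out : List (Int × List Int)) : Prop := out = gen_nexts_alt N numbers squares
instance (N : Int) (numbers : List Int) (squares : List Int) (out : List (Int × List Int)) : Decidable (Spec_gen_nexts N numbers squares out) := by unfold Spec_gen_nexts; infer_instance

-- ===== CLAIM (what is proved, stated in full; the proofs are below) =====
def Claim_equal_gen_nexts : Prop := ∀ (N : Int) (numbers : List Int) (squares : List Int), Dom_gen_nexts N numbers squares → Spec_gen_nexts N numbers squares (gen_nexts N numbers squares)

-- ===== LEMMAS AND PROOFS =====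

-- B's single-event dict update
def pvUpd1 (nexts : PySem.Dict Int (List Int)) (kv : Int × Int) : PySem.Dict Int (List Int) :=
  nexts.insert kv.1 (nexts.getD kv.1 [] ++ [kv.2])

-- A's per-pair dict update = two event updates
def pvUpd (i : Int) (nexts : PySem.Dict Int (List Int)) (j : Int) : PySem.Dict Int (List Int) :=
  pvUpd1 (pvUpd1 nexts (i, j)) (j, i)

theorem pv_foldl_flatMap {α β σ : Type} (g : α → List β) (f : σ → β → σ)
    (l : List α) (init : σ) :
    (l.flatMap g).foldl f init = l.foldl (fun s x => (g x).foldl f s) init := by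
  induction l generalizing init with
  | nil => rfl
  | cons x xs ih => simp [List.flatMap_cons, List.foldl_append, ih]

-- the ascending list of partners j that A's inner loop selects for a given i
theorem pv_partners_eq (N i : Int) (squares : List Int) :
    (PySem.List.pyRange (i + 1) (N + 1) 1).filter (fun j => decide (i + j ∈ squares)) =
    ((PySem.List.sorted (PySem.Set.ofList squares) (fun x => x) false).filter
        (fun s => decide (2 * i < s ∧ s ≤ i + N))).map (fun s => s - i) := by
  have hA : ((PySem.List.pyRange (i + 1) (N + 1) 1).filter
      (fun j => decide (i + j ∈ squares))).Pairwise (· < ·) :=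
    (PySem.List.pairwise_lt_pyRange_one (i+1) (N+1)).filter _
  have hB : (((PySem.List.sorted (PySem.Set.ofList squares) (fun x => x) false).filter
      (fun s => decide (2 * i < s ∧ s ≤ i + N))).map (fun s => s - i)).Pairwise (· < ·) := by
    rw [List.pairwise_map]
    exact ((PySem.List.sorted_ofList_pairwise_lt squares).filter _).imp
      (fun h => by omega)
  have hmem : ∀ x, x ∈ (PySem.List.pyRange (i + 1) (N + 1) 1).filter
      (fun j => decide (i + j ∈ squares)) ↔
      x ∈ ((PySem.List.sorted (PySem.Set.ofList squares) (fun x => x) false).filter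
        (fun s => decide (2 * i < s ∧ s ≤ i + N))).map (fun s => s - i) := by
    intro x
    simp only [List.mem_filter, List.mem_map, PySem.List.mem_pyRange_one,
      PySem.List.mem_sorted, PySem.Set.mem_ofList, decide_eq_true_eq]
    constructor
    · rintro ⟨⟨h1, h2⟩, h3⟩
      exact ⟨i + x, ⟨h3, by omega⟩, by omega⟩
    · rintro ⟨s, ⟨hs, hw⟩, rfl⟩
      exact ⟨by omega, by simpa using hs⟩
  have hperm := (List.perm_ext_iff_of_nodup hA.nodup hB.nodup).mpr hmem
  exact hperm.eq_of_pairwise (fun a b _ _ h1 h2 => absurd h2 (not_lt.mpr h1.le)) hA hB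

-- A's inner loop over i equals B's event fold for i's events
theorem pv_inner_eq (N i : Int) (squares : List Int) (d : PySem.Dict Int (List Int)) :
    (PySem.List.pyRange (i + 1) (N + 1) 1).foldl (fun nexts j =>
      if i + j ∈ squares then
        let nexts := nexts.insert i (nexts.getD i [] ++ [j])
        nexts.insert j (nexts.getD j [] ++ [i])
      else nexts) d =
    (((PySem.List.sorted (PySem.Set.ofList squares) (fun x => x) false).filter
        (fun s => decide (2 * i < s ∧ s ≤ i + N))).flatMap
      (fun s => [(i, s - i), (s - i, i)])).foldl pvUpd1 d := by
  have hA := PySem.List.foldl_ite_eq_foldl_filter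
    (p := fun j => i + j ∈ squares) (f := pvUpd i)
    (l := PySem.List.pyRange (i + 1) (N + 1) 1) (init := d)
  simp only [pvUpd, pvUpd1] at hA
  rw [hA, pv_partners_eq N i squares, List.foldl_map, pv_foldl_flatMap]
  simp [pvUpd, pvUpd1, List.foldl_cons]

-- ===== VERDICT (by name: the statement is the Claim_ definition above) =====
theorem gen_nexts_spec : Claim_equal_gen_nexts := by
  intro N numbers squares _
  unfold Spec_gen_nexts
  simp only [gen_nexts, gen_nexts_alt]
  rw [pv_foldl_flatMap]
  congr 2
  funext d i
  exact pv_inner_eq N i squares d
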